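-- pv_equiv track=rewrite | github.com/backordinary/QDP-FSL | source/0/readopenqasm_12452c.py | degree_adjcent_matrix
-- ===== SOURCE A (Python) =====
-- def degree_adjcent_matrix(cm: list, n: int):
--     deg = [0 for i in range(n)]
--     matrix = [[0 for i in range(n)] for j in range(n)]
--     for e in cm:
--         matrix[e[0]][e[1]] += 1
--         deg[e[0]] += 1
--         deg[e[1]] += 1
--     return deg, matrix
-- ===== SOURCE B (Python) =====
-- def degree_adjcent_matrix(cm: list, n: int):
--     matrix = [[0 for i in range(n)] for j in range(n)]
--     for e in cm:
--         matrix[e[0]][e[1]] += 1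
--     deg = [sum(matrix[i]) + sum(matrix[j][i] for j in range(n)) for i in range(n)]
--     return deg, matrix
-- ===== Notes on version B (the rewrite author's own statement) =====
-- stated objective: alternative
-- what changed: Degrees are no longer accumulated inside the edge loop; the loop only builds the adjacency matrix, and each degree is recomputed afterwards as that vertex's row sum plus column sum of the matrix.
import Mathlib
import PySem

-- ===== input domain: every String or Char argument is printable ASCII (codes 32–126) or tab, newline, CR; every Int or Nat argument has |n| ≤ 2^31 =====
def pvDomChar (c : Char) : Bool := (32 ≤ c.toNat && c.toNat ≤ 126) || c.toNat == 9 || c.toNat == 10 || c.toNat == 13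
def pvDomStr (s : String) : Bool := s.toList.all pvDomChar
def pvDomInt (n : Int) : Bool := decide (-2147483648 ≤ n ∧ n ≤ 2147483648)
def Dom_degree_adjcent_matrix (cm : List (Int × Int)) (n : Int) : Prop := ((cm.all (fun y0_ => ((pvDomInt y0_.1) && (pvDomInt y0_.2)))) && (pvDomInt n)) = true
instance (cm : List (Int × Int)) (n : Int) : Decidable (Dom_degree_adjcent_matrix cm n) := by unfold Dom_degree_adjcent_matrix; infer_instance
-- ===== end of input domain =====

-- B drops the degree updates from the edge loop and recomputes each degree afterwards
-- from the adjacency matrix as row sum + column sum (objective: alternative decomposition).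

-- ===== PORT A =====
def degree_adjcent_matrix (cm : List (Int × Int)) (n : Int) : List Int × List (List Int) :=
  let deg : List Int := (PySem.List.pyRange 0 n 1).map (fun _ => 0)
  let matrix : List (List Int) :=
    (PySem.List.pyRange 0 n 1).map (fun _ => (PySem.List.pyRange 0 n 1).map (fun _ => (0 : Int)))
  cm.foldl (fun dm e =>
    let matrix' := PySem.List.pySetD dm.2 e.1
      (PySem.List.pySetD (PySem.List.pyGetD dm.2 e.1 []) e.2
        (PySem.List.pyGetD (PySem.List.pyGetD dm.2 e.1 []) e.2 0 + 1))
    let deg1 := PySem.List.pySetD dm.1 e.1 (PySem.List.pyGetD dm.1 e.1 0 + 1)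
    let deg2 := PySem.List.pySetD deg1 e.2 (PySem.List.pyGetD deg1 e.2 0 + 1)
    (deg2, matrix')) (deg, matrix)

-- ===== PORT B =====
def degree_adjcent_matrix_alt (cm : List (Int × Int)) (n : Int) : List Int × List (List Int) :=
  let matrix0 : List (List Int) :=
    (PySem.List.pyRange 0 n 1).map (fun _ => (PySem.List.pyRange 0 n 1).map (fun _ => (0 : Int)))
  let matrix := cm.foldl (fun m e =>
    PySem.List.pySetD m e.1
      (PySem.List.pySetD (PySem.List.pyGetD m e.1 []) e.2
        (PySem.List.pyGetD (PySem.List.pyGetD m e.1 []) e.2 0 + 1))) matrix0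
  let deg : List Int := (PySem.List.pyRange 0 n 1).map (fun i =>
    (PySem.List.pyGetD matrix i []).sum +
    (PySem.List.pyRange 0 n 1).foldl
      (fun s j => s + PySem.List.pyGetD (PySem.List.pyGetD matrix j []) i 0) 0)
  (deg, matrix)

-- ===== PRECONDITION & SPEC =====
-- Pre_ excludes exactly the edges whose endpoints are outside Python's index range
-- (including the wrap-around range for negative indices): there A raises IndexError.
def Pre_degree_adjcent_matrix (cm : List (Int × Int)) (n : Int) : Prop :=
  ∀ e ∈ cm, -n ≤ e.1 ∧ e.1 < n ∧ -n ≤ e.2 ∧ e.2 < n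
instance (cm : List (Int × Int)) (n : Int) : Decidable (Pre_degree_adjcent_matrix cm n) := by
  unfold Pre_degree_adjcent_matrix; infer_instance

def pvWitness_degree_adjcent_matrix : (List (Int × Int)) × Int := ([(0, 1), (-1, 2), (1, 1)], 3)

def Spec_degree_adjcent_matrix (cm : List (Int × Int)) (n : Int) (out : List Int × List (List Int)) : Prop := out = degree_adjcent_matrix_alt cm n
instance (cm : List (Int × Int)) (n : Int) (out : List Int × List (List Int)) : Decidable (Spec_degree_adjcent_matrix cm n out) := by unfold Spec_degree_adjcent_matrix; infer_instance

-- ===== CLAIM (what is proved, stated in full; the proofs are below) =====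
def Claim_equal_degree_adjcent_matrix : Prop := ∀ (cm : List (Int × Int)) (n : Int), Dom_degree_adjcent_matrix cm n → Pre_degree_adjcent_matrix cm n → Spec_degree_adjcent_matrix cm n (degree_adjcent_matrix cm n)

-- ===== LEMMAS AND PROOFS =====

-- a foldl whose state is a pair whose components evolve independently splits
lemma foldl_pair {α β γ : Type} (f : α → γ → α) (g : β → γ → β) (l : List γ) (a : α) (b : β) :
    l.foldl (fun p e => (f p.1 e, g p.2 e)) (a, b) = (l.foldl f a, l.foldl g b) := by
  induction l generalizing a b with
  | nil => rfl
  | cons x t ih => simpa using ih (f a x) (g b x)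

-- the Nat index Python actually uses for an Int index i on a list of length N
def wrapIdx (N : Nat) (i : Int) : Nat := if i < 0 then (i + N).toNat else i.toNat

lemma wrapIdx_lt {N : Nat} {i : Int} (h1 : -(N : Int) ≤ i) (h2 : i < N) : wrapIdx N i < N := by
  unfold wrapIdx; split_ifs <;> omega

lemma pyGetD_wrapIdx {α : Type} (xs : List α) (i : Int) (d : α)
    (h1 : -(xs.length : Int) ≤ i) (h2 : i < xs.length) :
    PySem.List.pyGetD xs i d = xs.getD (wrapIdx xs.length i) d := by
  unfold wrapIdx
  by_cases h : i < 0
  · rw [if_pos h]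
    have hk : i = -(((-i).toNat : Nat) : Int) := by omega
    rw [hk, PySem.List.pyGetD_neg_natCast xs _ d (by omega) (by omega)]
    rw [List.getD_eq_getElem _ _ (by omega)]
    congr 1
    omega
  · rw [if_neg h]
    rw [PySem.List.pyGetD_eq_getElem xs d (by omega) h2]
    rw [List.getD_eq_getElem _ _ (by omega)]

lemma pySetD_wrapIdx {α : Type} (xs : List α) (i : Int) (v : α)
    (h1 : -(xs.length : Int) ≤ i) (h2 : i < xs.length) :
    PySem.List.pySetD xs i v = xs.set (wrapIdx xs.length i) v := by
  unfold PySem.List.pySetD PySem.List.pySet? PySem.List.pyIdx? wrapIdx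
  by_cases h : 0 ≤ i
  · rw [if_pos h, if_pos h2]
    simp only [Option.map_some, Option.getD_some]
    rw [if_neg (by omega)]
  · rw [if_neg h, if_pos (by omega)]
    simp only [Option.map_some, Option.getD_some]
    rw [if_pos (by omega)]
    congr 1
    omega

lemma map_const_pyRange {α : Type} (n : Int) (c : α) :
    (PySem.List.pyRange 0 n 1).map (fun _ => c) = List.replicate n.toNat c := by
  rw [List.map_const', PySem.List.length_pyRange_one]
  norm_num

lemma map_range_getD {α β : Type} (xs : List α) (d : α) (f : α → β) :
    (List.range xs.length).map (fun j => f (xs.getD j d)) = xs.map f := by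
  induction xs with
  | nil => simp
  | cons x t ih =>
    rw [List.length_cons, List.range_succ_eq_map]
    simp only [List.map_cons, List.map_map, Function.comp_def, List.getD_cons_zero,
      List.getD_cons_succ]
    rw [ih]

lemma sum_set_int (l : List Int) (i : Nat) (v : Int) (h : i < l.length) :
    (l.set i v).sum = l.sum - l[i] + v := by
  induction l generalizing i with
  | nil => simp at h
  | cons x t ih =>
    cases i with
    | zero => simp [List.set]; ring
    | succ j =>
      have hj : j < t.length := by simpa using h
      simp only [List.set, List.sum_cons, ih j hj, List.getElem_cons_succ]
      ring

-- the specification of the degree list in terms of the matrix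
def degSpec (M : List (List Int)) : List Int :=
  (List.range M.length).map (fun k =>
    (M.getD k []).sum + (M.map (fun r => r.getD k 0)).sum)

lemma length_degSpec (M : List (List Int)) : (degSpec M).length = M.length := by
  simp [degSpec]

lemma degSpec_getElem (M : List (List Int)) (k : Nat) (h : k < (degSpec M).length) :
    (degSpec M)[k] = (M.getD k []).sum + (M.map (fun r => r.getD k 0)).sum := by
  simp [degSpec]

-- the two abstract loop bodies of the ports
def mstep (M : List (List Int)) (e : Int × Int) : List (List Int) :=
  PySem.List.pySetD M e.1
    (PySem.List.pySetD (PySem.List.pyGetD M e.1 []) e.2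
      (PySem.List.pyGetD (PySem.List.pyGetD M e.1 []) e.2 0 + 1))

def dstep (d : List Int) (e : Int × Int) : List Int :=
  PySem.List.pySetD (PySem.List.pySetD d e.1 (PySem.List.pyGetD d e.1 0 + 1)) e.2
    (PySem.List.pyGetD (PySem.List.pySetD d e.1 (PySem.List.pyGetD d e.1 0 + 1)) e.2 0 + 1)

-- Nat-index forms of the two loop bodies
def stepNat (M : List (List Int)) (ia ib : Nat) : List (List Int) :=
  M.set ia ((M.getD ia []).set ib ((M.getD ia []).getD ib 0 + 1))

def dNat (d : List Int) (ia ib : Nat) : List Int :=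
  (d.set ia (d.getD ia 0 + 1)).set ib ((d.set ia (d.getD ia 0 + 1)).getD ib 0 + 1)

lemma dstep_eq (d : List Int) (e : Int × Int)
    (h1 : -(d.length : Int) ≤ e.1) (h2 : e.1 < d.length)
    (h3 : -(d.length : Int) ≤ e.2) (h4 : e.2 < d.length) :
    dstep d e = dNat d (wrapIdx d.length e.1) (wrapIdx d.length e.2) := by
  unfold dstep dNat
  rw [pyGetD_wrapIdx d e.1 0 h1 h2, pySetD_wrapIdx d e.1 _ h1 h2]
  have hlen : (d.set (wrapIdx d.length e.1) (d.getD (wrapIdx d.length e.1) 0 + 1)).length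
      = d.length := by simp
  rw [pyGetD_wrapIdx _ e.2 0 (by rw [hlen]; exact h3) (by rw [hlen]; exact_mod_cast h4),
    pySetD_wrapIdx _ e.2 _ (by rw [hlen]; exact h3) (by rw [hlen]; exact_mod_cast h4), hlen]

lemma row_len {M : List (List Int)} (hrow : ∀ r ∈ M, r.length = M.length)
    {k : Nat} (hk : k < M.length) : (M.getD k []).length = M.length := by
  rw [List.getD_eq_getElem _ _ hk]
  exact hrow _ (List.getElem_mem hk)

lemma mstep_eq (M : List (List Int)) (e : Int × Int)
    (hrow : ∀ r ∈ M, r.length = M.length)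
    (h1 : -(M.length : Int) ≤ e.1) (h2 : e.1 < M.length)
    (h3 : -(M.length : Int) ≤ e.2) (h4 : e.2 < M.length) :
    mstep M e = stepNat M (wrapIdx M.length e.1) (wrapIdx M.length e.2) := by
  unfold mstep stepNat
  have hR : (M.getD (wrapIdx M.length e.1) []).length = M.length :=
    row_len hrow (wrapIdx_lt h1 h2)
  rw [pyGetD_wrapIdx M e.1 [] h1 h2,
    pyGetD_wrapIdx _ e.2 0 (by rw [hR]; exact h3) (by rw [hR]; exact_mod_cast h4),
    pySetD_wrapIdx _ e.2 _ (by rw [hR]; exact h3) (by rw [hR]; exact_mod_cast h4),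
    pySetD_wrapIdx M e.1 _ h1 h2, hR]

lemma getD_set_lt {α : Type} (l : List α) (i j : Nat) (v d : α) (hj : j < l.length) :
    (l.set i v).getD j d = if i = j then v else l.getD j d := by
  rw [List.getD_eq_getElem _ _ (by simpa using hj), List.getElem_set,
    List.getD_eq_getElem _ _ hj]

lemma degSpec_getD (M : List (List Int)) (k : Nat) (hk : k < M.length) :
    (degSpec M).getD k 0 = (M.getD k []).sum + (M.map (fun r => r.getD k 0)).sum := by
  rw [List.getD_eq_getElem _ _ (by rw [length_degSpec]; exact hk)]
  exact degSpec_getElem M k _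

-- the central identity: one matrix increment shifts the row/column sums exactly
-- the way A's two degree increments shift the degree list
lemma degSpec_step (M : List (List Int)) (ia ib : Nat)
    (hia : ia < M.length) (hib : ib < M.length)
    (hrow : ∀ r ∈ M, r.length = M.length) :
    dNat (degSpec M) ia ib = degSpec (stepNat M ia ib) := by
  have hR : (M.getD ia []).length = M.length := row_len hrow hia
  apply List.ext_getElem
  · simp [dNat, stepNat, length_degSpec]
  intro k hk1 hk2
  have hk : k < M.length := by simpa [dNat, length_degSpec] using hk1
  have hDlen : (degSpec M).length = M.length := length_degSpec M
  have hlen1 : ((degSpec M).set ia ((degSpec M).getD ia 0 + 1)).length = M.length := by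
    simp [hDlen]
  rw [← List.getD_eq_getElem _ 0 hk1, ← List.getD_eq_getElem _ 0 hk2]
  unfold dNat
  rw [getD_set_lt _ ib k _ 0 (by rw [hlen1]; exact hk),
      getD_set_lt _ ia ib _ 0 (by rw [hDlen]; exact hib),
      getD_set_lt _ ia k _ 0 (by rw [hDlen]; exact hk)]
  unfold stepNat
  rw [degSpec_getD (M.set ia ((M.getD ia []).set ib ((M.getD ia []).getD ib 0 + 1))) k
        (by simpa using hk),
      getD_set_lt M ia k _ [] hk]
  have hcol : ((M.set ia ((M.getD ia []).set ib ((M.getD ia []).getD ib 0 + 1))).map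
        (fun r => r.getD k 0)).sum
      = (M.map (fun r => r.getD k 0)).sum - (M.getD ia []).getD k 0
        + ((M.getD ia []).set ib ((M.getD ia []).getD ib 0 + 1)).getD k 0 := by
    rw [List.map_set, sum_set_int _ _ _ (by simpa using hia)]
    congr 2
    rw [List.getElem_map, List.getD_eq_getElem M [] hia]
  rw [hcol]
  have hble : ib < (M.getD ia []).length := by rw [hR]; exact hib
  have hR'sum : ((M.getD ia []).set ib ((M.getD ia []).getD ib 0 + 1)).sum
      = (M.getD ia []).sum + 1 := by
    rw [sum_set_int _ _ _ hble]
    have hgg : (M.getD ia []).getD ib 0 = (M.getD ia [])[ib] := List.getD_eq_getElem _ _ hble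
    rw [hgg]
    ring
  have hR'getD : ((M.getD ia []).set ib ((M.getD ia []).getD ib 0 + 1)).getD k 0
      = if ib = k then (M.getD ia []).getD k 0 + 1 else (M.getD ia []).getD k 0 := by
    rw [getD_set_lt _ ib k _ 0 (by rw [hR]; exact hk)]
    by_cases h : ib = k
    · rw [if_pos h, if_pos h, h]
    · rw [if_neg h, if_neg h]
  rw [hR'getD, apply_ite List.sum, hR'sum]
  rw [degSpec_getD M k hk, degSpec_getD M ia hia, degSpec_getD M ib hib]
  split_ifs <;> subst_vars <;> omega

lemma square_stepNat (M : List (List Int)) (ia ib : Nat) (hia : ia < M.length)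
    (hrow : ∀ r ∈ M, r.length = M.length) :
    (stepNat M ia ib).length = M.length ∧
    ∀ r ∈ stepNat M ia ib, r.length = (stepNat M ia ib).length := by
  have hR : (M.getD ia []).length = M.length := row_len hrow hia
  constructor
  · simp [stepNat]
  · intro r hr
    rcases List.mem_or_eq_of_mem_set hr with h | h
    · simp [stepNat, hrow r h]
    · subst h
      simp only [stepNat, List.length_set]
      exact hR

-- the fold invariant: A's running degree list stays equal to degSpec of the matrix
lemma fold_deg (n : Int) (cm : List (Int × Int))
    (hpre : ∀ e ∈ cm, -n ≤ e.1 ∧ e.1 < n ∧ -n ≤ e.2 ∧ e.2 < n)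
    (M : List (List Int)) (hM : M.length = n.toNat)
    (hrow : ∀ r ∈ M, r.length = M.length) :
    cm.foldl dstep (degSpec M) = degSpec (cm.foldl mstep M) := by
  induction cm generalizing M with
  | nil => rfl
  | cons e t ih =>
    obtain ⟨hb1, hb2, hb3, hb4⟩ := hpre e List.mem_cons_self
    have hMn : (M.length : Int) = n := by omega
    have h1 : -(M.length : Int) ≤ e.1 := by omega
    have h2 : e.1 < (M.length : Int) := by omega
    have h3 : -(M.length : Int) ≤ e.2 := by omega
    have h4 : e.2 < (M.length : Int) := by omega
    have hDlen : (degSpec M).length = M.length := length_degSpec M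
    rw [List.foldl_cons, List.foldl_cons,
      dstep_eq (degSpec M) e (by rw [hDlen]; exact h1) (by rw [hDlen]; exact_mod_cast h2)
        (by rw [hDlen]; exact h3) (by rw [hDlen]; exact_mod_cast h4),
      hDlen, mstep_eq M e hrow h1 h2 h3 h4,
      degSpec_step M _ _ (wrapIdx_lt h1 h2) (wrapIdx_lt h3 h4) hrow]
    obtain ⟨hl, hr⟩ := square_stepNat M (wrapIdx M.length e.1) (wrapIdx M.length e.2)
      (wrapIdx_lt h1 h2) hrow
    exact ih (fun x hx => hpre x (List.mem_cons_of_mem _ hx)) _ (by omega) hr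

lemma fold_square (n : Int) (cm : List (Int × Int))
    (hpre : ∀ e ∈ cm, -n ≤ e.1 ∧ e.1 < n ∧ -n ≤ e.2 ∧ e.2 < n)
    (M : List (List Int)) (hM : M.length = n.toNat)
    (hrow : ∀ r ∈ M, r.length = M.length) :
    (cm.foldl mstep M).length = n.toNat := by
  induction cm generalizing M with
  | nil => simpa using hM
  | cons e t ih =>
    obtain ⟨hb1, hb2, hb3, hb4⟩ := hpre e List.mem_cons_self
    have h1 : -(M.length : Int) ≤ e.1 := by omega
    have h2 : e.1 < (M.length : Int) := by omega
    have h3 : -(M.length : Int) ≤ e.2 := by omega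
    have h4 : e.2 < (M.length : Int) := by omega
    rw [List.foldl_cons, mstep_eq M e hrow h1 h2 h3 h4]
    obtain ⟨hl, hr⟩ := square_stepNat M (wrapIdx M.length e.1) (wrapIdx M.length e.2)
      (wrapIdx_lt h1 h2) hrow
    exact ih (fun x hx => hpre x (List.mem_cons_of_mem _ hx)) _ (by omega) hr

-- A's fold over the (deg, matrix) pair splits into the two independent folds
lemma A_eq (cm : List (Int × Int)) (n : Int) :
    degree_adjcent_matrix cm n =
      (cm.foldl dstep ((PySem.List.pyRange 0 n 1).map (fun _ => 0)),
       cm.foldl mstep ((PySem.List.pyRange 0 n 1).map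
         (fun _ => (PySem.List.pyRange 0 n 1).map (fun _ => (0 : Int))))) := by
  unfold degree_adjcent_matrix
  exact foldl_pair dstep mstep cm _ _

lemma B_eq (cm : List (Int × Int)) (n : Int) :
    degree_adjcent_matrix_alt cm n =
      ((PySem.List.pyRange 0 n 1).map (fun i =>
        (PySem.List.pyGetD (cm.foldl mstep ((PySem.List.pyRange 0 n 1).map
          (fun _ => (PySem.List.pyRange 0 n 1).map (fun _ => (0 : Int))))) i []).sum +
        (PySem.List.pyRange 0 n 1).foldl
          (fun s j => s + PySem.List.pyGetD (PySem.List.pyGetD (cm.foldl mstep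
            ((PySem.List.pyRange 0 n 1).map
              (fun _ => (PySem.List.pyRange 0 n 1).map (fun _ => (0 : Int))))) j []) i 0) 0),
       cm.foldl mstep ((PySem.List.pyRange 0 n 1).map
         (fun _ => (PySem.List.pyRange 0 n 1).map (fun _ => (0 : Int))))) := rfl

-- B's second pass computes degSpec of the final matrix
lemma degB_spec (n : Int) (M : List (List Int)) (hM : M.length = n.toNat) :
    (PySem.List.pyRange 0 n 1).map (fun i =>
      (PySem.List.pyGetD M i []).sum +
      (PySem.List.pyRange 0 n 1).foldl
        (fun s j => s + PySem.List.pyGetD (PySem.List.pyGetD M j []) i 0) 0)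
    = degSpec M := by
  unfold degSpec
  rw [PySem.List.pyRange_one]
  simp only [sub_zero, zero_add, List.map_map, Function.comp_def, List.foldl_map,
    PySem.List.pyGetD_natCast, PySem.List.foldl_add, zero_add]
  rw [show n.toNat = M.length from hM.symm]
  apply List.map_congr_left
  intro k _
  congr 1
  rw [map_range_getD M [] (fun r => r.getD k 0)]

lemma degSpec_replicate (N : Nat) :
    degSpec (List.replicate N (List.replicate N (0 : Int))) = List.replicate N 0 := by
  unfold degSpec
  simp only [List.length_replicate, List.map_replicate, List.sum_replicate]
  have h1 : ∀ k, ((List.replicate N (List.replicate N (0:Int))).getD k []).sum = 0 := by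
    intro k
    by_cases h : k < N
    · rw [List.getD_eq_getElem _ _ (by simpa using h)]
      simp
    · rw [List.getD_eq_default _ _ (by simpa using h)]
      rfl
  have h2 : ∀ k, (List.replicate N (0:Int)).getD k 0 = 0 := by
    intro k
    by_cases h : k < N
    · rw [List.getD_eq_getElem _ _ (by simpa using h)]
      simp
    · rw [List.getD_eq_default _ _ (by simpa using h)]
  simp only [h1, h2, smul_zero, add_zero]
  rw [List.map_const', List.length_range]

-- ===== VERDICT (by name: the statement is the Claim_ definition above) =====
theorem degree_adjcent_matrix_spec : Claim_equal_degree_adjcent_matrix := by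
  intro cm n _ hpre
  unfold Spec_degree_adjcent_matrix
  rw [A_eq, B_eq]
  have hconst : ((PySem.List.pyRange 0 n 1).map
      (fun _ => (PySem.List.pyRange 0 n 1).map (fun _ => (0 : Int))))
      = List.replicate n.toNat (List.replicate n.toNat (0 : Int)) := by
    rw [show ((PySem.List.pyRange 0 n 1).map (fun _ => (0 : Int)))
        = List.replicate n.toNat (0 : Int) from map_const_pyRange n 0]
    exact map_const_pyRange n _
  have hd0 : ((PySem.List.pyRange 0 n 1).map (fun _ => (0 : Int)))
      = List.replicate n.toNat (0 : Int) := map_const_pyRange n 0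
  rw [hconst, hd0]
  have hM0 : (List.replicate n.toNat (List.replicate n.toNat (0:Int))).length = n.toNat := by simp
  have hrow0 : ∀ r ∈ List.replicate n.toNat (List.replicate n.toNat (0:Int)),
      r.length = (List.replicate n.toNat (List.replicate n.toNat (0:Int))).length := by
    intro r hr
    rw [List.eq_of_mem_replicate hr]
    simp
  have hfin : (cm.foldl mstep (List.replicate n.toNat (List.replicate n.toNat (0:Int)))).length
      = n.toNat := fold_square n cm hpre _ hM0 hrow0
  refine Prod.ext ?_ rfl
  show cm.foldl dstep (List.replicate n.toNat 0) = _
  rw [degB_spec n _ hfin]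
  have hfd := fold_deg n cm hpre _ hM0 hrow0
  rw [degSpec_replicate n.toNat] at hfd
  exact hfd
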